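-- pv_equiv track=rewrite | github.com/nextgis/qgis_osminfo | src/osminfo/openstreetmap/tag2link.py | _choose_best_item
-- ===== SOURCE A (Python) =====
-- from typing import Dict, Iterable, List, NamedTuple, Optional, Tuple
--
-- def _choose_best_item(
--     items: List[Dict[str, str]]
-- ) -> Optional[Dict[str, str]]:
--     """Choose the most suitable tag2link record for a single OSM key.
--
--     :param items: Candidate records that describe the same key.
--     :return: Selected record or None if the candidates stay ambiguous.
--     """
--
--     if len(items) == 0:
--         return None
--
--     if len(items) == 1:
--         return items[0]
--
--     ranked_items = sorted(
--         items,
--         key=lambda item: 0 if item.get("rank") == "preferred" else 1,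
--     )
--
--     unique_items: List[Dict[str, str]] = []
--     seen_urls = set()
--     for item in ranked_items:
--         url = item.get("url")
--         if url in seen_urls:
--             continue
--         seen_urls.add(url)
--         unique_items.append(item)
--
--     # Compare only the strongest rank level that is present after URL
--     # deduplication. Lower-ranked alternatives are ignored once a better
--     # ranked candidate exists.
--     top_rank = unique_items[0].get("rank")
--     top_items = [
--         item for item in unique_items if item.get("rank") == top_rank
--     ]
--
--     if len(top_items) == 1:
--         return top_items[0]
--
--     grouped_items: Dict[str, List[Dict[str, str]]] = {}
--     for item in top_items:
--         source = item.get("source", "")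
--         grouped_items.setdefault(source, []).append(item)
--
--     # More than two distinct sources means there is no clear equivalent
--     # to the Ruby helper's fallback logic, so keep the result unresolved.
--     if len(grouped_items) > 2:
--         return None
--
--     # If each source contributes exactly one top-ranked candidate,
--     # prefer osmwiki when present and otherwise keep the first candidate.
--     if all(len(values) == 1 for values in grouped_items.values()):
--         osm_wiki_items = grouped_items.get("osmwiki:P8")
--         if osm_wiki_items:
--             return osm_wiki_items[0]
--         return top_items[0]
--
--     # If one source produced a single candidate while another produced
--     # multiple competing variants, prefer the unambiguous source.
--     for values in grouped_items.values():
--         if len(values) == 1: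
--             return values[0]
--
--     return None
-- ===== SOURCE B (Python) =====
-- def _choose_best_item(items):
--     """Choose the most suitable tag2link record for a single OSM key.
--
--     One streaming pass with constant extra state instead of
--     sort -> dedup list -> top filter -> grouping dict: the pool of
--     relevant candidates is decided up front (preferred records when any
--     exist, otherwise all records), and a single fold over that pool
--     simultaneously skips repeated urls, keeps only the top rank, and
--     maintains at most two per-source slots (source, count, first item),
--     an overflow flag for a third source, the first kept item and the
--     first osmwiki:P8 item; the answer is read off the final state.
--     """
--     if not items:
--         return None
--     if len(items) == 1:
--         return items[0]
--
--     pool = [it for it in items if it.get("rank") == "preferred"]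
--     if pool:
--         top_rank = "preferred"
--     else:
--         pool = items
--         top_rank = items[0].get("rank")
--
--     seen_urls = set()
--     first = None       # first unique top-ranked item
--     total = 0          # number of unique top-ranked items
--     slots = []         # up to 2 entries: [source, count, first item]
--     overflow = False   # a third distinct source appeared
--     osm_first = None   # first top item whose source is osmwiki:P8
--
--     for it in pool:
--         url = it.get("url")
--         if url in seen_urls:
--             continue
--         seen_urls.add(url)
--         if it.get("rank") != top_rank:
--             continue
--         total += 1
--         if first is None:
--             first = it
--         source = it.get("source", "")
--         if osm_first is None and source == "osmwiki:P8":
--             osm_first = it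
--         for slot in slots:
--             if slot[0] == source:
--                 slot[1] += 1
--                 break
--         else:
--             if len(slots) == 2:
--                 overflow = True
--             else:
--                 slots.append([source, 1, it])
--
--     if total == 1:
--         return first
--     if overflow:
--         return None
--     if all(slot[1] == 1 for slot in slots):
--         return osm_first if osm_first is not None else first
--     for slot in slots:
--         if slot[1] == 1:
--             return slot[2]
--     return None
-- ===== Notes on version B (the rewrite author's own statement) =====
-- stated objective: alternative
-- what changed: Replaces A's staged pipeline (stable sort by rank, dedup list, top-rank filter, grouping dict, then branch) by choosing the candidate pool up front (preferred records if any, else all) and making ONE streaming fold over it with constant extra state - seen urls, first kept item, kept count, at most two (source,count,first-item) slots, a third-source overflow flag and the first osmwiki:P8 item - reading the answer off the final state.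
import Mathlib
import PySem

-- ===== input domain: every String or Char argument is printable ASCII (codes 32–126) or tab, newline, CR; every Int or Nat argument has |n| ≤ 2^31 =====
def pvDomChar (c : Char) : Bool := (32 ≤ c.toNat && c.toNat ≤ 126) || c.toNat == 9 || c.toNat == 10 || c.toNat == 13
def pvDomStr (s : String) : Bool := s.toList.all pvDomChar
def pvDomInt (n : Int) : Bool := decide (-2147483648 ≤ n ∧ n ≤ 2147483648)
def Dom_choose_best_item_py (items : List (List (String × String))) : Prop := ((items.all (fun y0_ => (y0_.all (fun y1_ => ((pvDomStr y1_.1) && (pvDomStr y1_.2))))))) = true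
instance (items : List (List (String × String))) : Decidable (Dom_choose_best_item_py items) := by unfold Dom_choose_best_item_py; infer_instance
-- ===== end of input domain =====

-- B replaces A's staged pipeline (stable sort, dedup list, top filter, grouping dict)
-- by one streaming fold over an up-front candidate pool with constant extra state
-- (two source slots, overflow flag, first/osmwiki trackers); objective: alternative.

-- item.get(k) on a Python dict represented as an association list (first match)
def dget (item : List (String × String)) (k : String) : Option String :=
  (PySem.Dict.mk item).get? k

-- ===== PORT A =====
-- the sort key lambda
def rank_key (item : List (String × String)) : Int :=
  if dget item "rank" == some "preferred" then 0 else 1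

-- the body of A's URL-dedup loop (seen set + output list)
def dstep (st : List (List (String × String)) × PySem.Set (Option String))
    (item : List (String × String)) :
    List (List (String × String)) × PySem.Set (Option String) :=
  if st.2.contains (dget item "url") then st
  else (st.1 ++ [item], st.2.add (dget item "url"))

def dedup_by_url (ranked : List (List (String × String))) : List (List (String × String)) :=
  (ranked.foldl dstep ([], PySem.Set.empty)).1

-- grouped.setdefault(source, []).append(item) == modify source [] (· ++ [item])
def group_by_source (top : List (List (String × String))) :
    PySem.Dict String (List (List (String × String))) :=
  top.foldl
    (fun (d : PySem.Dict String (List (List (String × String)))) item =>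
      d.modify ((dget item "source").getD "") [] (fun v => v ++ [item])) PySem.Dict.empty

def choose_best_item_py (items : List (List (String × String))) : Option (List (String × String)) :=
  if items.length = 0 then none
  else if items.length = 1 then PySem.List.pyGet? items 0
  else
    let ranked := PySem.List.sorted items rank_key false
    -- unique_items[0]: unique is nonempty here since items is (headI only for totality)
    let unique := dedup_by_url ranked
    let top_rank := dget unique.headI "rank"
    let top := unique.filter (fun item => dget item "rank" == top_rank)
    if top.length = 1 then PySem.List.pyGet? top 0
    else
      let grouped := group_by_source top
      if grouped.size > 2 then none
      else if grouped.values.all (fun v => v.length == 1) then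
        match grouped.get? "osmwiki:P8" with
        | some v => if v.length = 0 then PySem.List.pyGet? top 0 else PySem.List.pyGet? v 0
        | none => PySem.List.pyGet? top 0
      else
        match grouped.values.find? (fun v => v.length == 1) with
        | some v => PySem.List.pyGet? v 0
        | none => none

-- ===== PORT B =====
-- item.get("source", "")
def src_of (it : List (String × String)) : String := (dget it "source").getD ""

-- the fold state of B's single pass
structure StB where
  seen : PySem.Set (Option String)
  first : Option (List (String × String))
  total : Int
  slots : List (String × Int × List (String × String))
  overflow : Bool
  osm : Option (List (String × String))

-- the inner `for slot in slots: if slot[0]==source: slot[1]+=1; break` loop: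
-- some = a slot matched (and was incremented), none = the for-else fires
def bump_slots (slots : List (String × Int × List (String × String))) (source : String) :
    Option (List (String × Int × List (String × String))) :=
  match slots with
  | [] => none
  | s :: rest =>
    if s.1 == source then some ((s.1, s.2.1 + 1, s.2.2) :: rest)
    else (bump_slots rest source).map (s :: ·)

-- the body of B's single streaming pass
def stepB (tr : Option String) (st : StB) (it : List (String × String)) : StB :=
  let url := dget it "url"
  if st.seen.contains url then st
  else
    let st := { st with seen := st.seen.add url }
    if dget it "rank" != tr then st
    else
      let first := if st.first.isNone then some it else st.first
      let total := st.total + 1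
      let source := src_of it
      let osm := if st.osm.isNone && source == "osmwiki:P8" then some it else st.osm
      match bump_slots st.slots source with
      | some slots' =>
          { st with first := first, total := total, osm := osm, slots := slots' }
      | none =>
          if st.slots.length == 2 then
            { st with first := first, total := total, osm := osm, overflow := true }
          else
            { st with first := first, total := total, osm := osm,
                      slots := st.slots ++ [(source, 1, it)] }

def choose_best_item_py_alt (items : List (List (String × String))) :
    Option (List (String × String)) :=
  if items.isEmpty then none
  else if items.length = 1 then PySem.List.pyGet? items 0
  else
    let pref := items.filter (fun it => dget it "rank" == some "preferred")
    let pool := if pref.isEmpty then items else pref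
    let tr := if pref.isEmpty then dget items.headI "rank" else some "preferred"
    let st := pool.foldl (stepB tr) ⟨PySem.Set.empty, none, 0, [], false, none⟩
    if st.total = 1 then st.first
    else if st.overflow then none
    else if st.slots.all (fun s => s.2.1 == 1) then
      match st.osm with
      | some it => some it
      | none => st.first
    else
      match st.slots.find? (fun s => s.2.1 == 1) with
      | some s => some s.2.2
      | none => none

-- ===== PRECONDITION & SPEC =====
def Spec_choose_best_item_py (items : List (List (String × String))) (out : Option (List (String × String))) : Prop := out = choose_best_item_py_alt items
instance (items : List (List (String × String))) (out : Option (List (String × String))) : Decidable (Spec_choose_best_item_py items out) := by unfold Spec_choose_best_item_py; infer_instance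

-- ===== CLAIM (what is proved, stated in full; the proofs are below) =====
def Claim_equal_choose_best_item_py : Prop := ∀ (items : List (List (String × String))), Dom_choose_best_item_py items → Spec_choose_best_item_py items (choose_best_item_py items)

-- ===== LEMMAS AND PROOFS =====

-- ---- A-side machinery: the binary-key stable sort is a stable partition ----

-- inserting a key-0 element: it passes every key-0 element and stops at the first key-1 element
theorem insertBy_mid {α : Type} (before : α → α → Bool) (x : α) (A : List α) (b : α) (B : List α)
    (hA : ∀ a ∈ A, before x a = false) (hb : before x b = true) :
    PySem.List.insertBy before x (A ++ b :: B) = A ++ x :: b :: B := by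
  induction A with
  | nil => simp [PySem.List.insertBy, hb]
  | cons a A ih =>
    have ha := hA a (by simp)
    simp only [List.cons_append, PySem.List.insertBy, ha]
    simp only [Bool.false_eq_true, if_false]
    rw [ih (fun a ha' => hA a (by simp [ha']))]

-- a stable sort by a 0/1 key is the stable partition
theorem sorted_binary {α : Type} (p : α → Bool) (xs : List α) :
    PySem.List.sorted xs (fun x => if p x then (0 : Int) else 1) false
      = xs.filter p ++ xs.filter (fun x => !p x) := by
  have key : ∀ (ys A B : List α), (∀ a ∈ A, p a = true) → (∀ b ∈ B, p b = false) →
      ys.foldl (fun acc x => PySem.List.insertBy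
        (fun a b => decide ((if p a then (0:Int) else 1) < (if p b then (0:Int) else 1))) x acc) (A ++ B)
        = (A ++ ys.filter p) ++ (B ++ ys.filter (fun x => !p x)) := by
    intro ys
    induction ys with
    | nil =>
      intro A B _ _
      simp
    | cons y ys ih =>
      intro A B hA hB
      rw [List.foldl_cons]
      by_cases hp : p y = true
      · have hbef : ∀ a ∈ A, (fun a b => decide ((if p a then (0:Int) else 1) < (if p b then (0:Int) else 1))) y a = false := by
          intro a ha
          simp [hp, hA a ha]
        have hA' : ∀ a ∈ A ++ [y], p a = true := by
          intro a ha
          rcases List.mem_append.1 ha with h | h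
          · exact hA a h
          · rw [List.mem_singleton] at h
            subst h
            exact hp
        cases B with
        | nil =>
          rw [List.append_nil, PySem.List.insertBy_of_forall_not_before _ _ _ hbef]
          have h2 := ih (A ++ [y]) [] hA' (by simp)
          rw [List.append_nil] at h2
          rw [h2]
          simp [hp, List.append_assoc]
        | cons b B =>
          have hbb : (fun a b => decide ((if p a then (0:Int) else 1) < (if p b then (0:Int) else 1))) y b = true := by
            simp [hp, hB b (by simp)]
          rw [insertBy_mid _ _ _ _ _ hbef hbb]
          have h2 := ih (A ++ [y]) (b :: B) hA' hB
          rw [show (A ++ [y]) ++ (b :: B) = A ++ y :: b :: B by simp] at h2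
          rw [h2]
          simp [hp, List.append_assoc]
      · have hbef : ∀ a ∈ A ++ B, (fun a b => decide ((if p a then (0:Int) else 1) < (if p b then (0:Int) else 1))) y a = false := by
          intro a ha
          rcases List.mem_append.1 ha with h | h
          · simp [hp, hA a h]
          · simp [hp, hB a h]
        rw [PySem.List.insertBy_of_forall_not_before _ _ _ hbef]
        have hB' : ∀ b ∈ B ++ [y], p b = false := by
          intro b hb
          rcases List.mem_append.1 hb with h | h
          · exact hB b h
          · rw [List.mem_singleton] at h
            subst h
            simpa using hp
        have h2 := ih A (B ++ [y]) hA hB'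
        rw [show (A ++ B) ++ [y] = A ++ (B ++ [y]) from List.append_assoc _ _ _]
        rw [h2]
        simp [hp, List.append_assoc]
  have h0 : PySem.List.sorted xs (fun x => if p x then (0 : Int) else 1) false
      = xs.foldl (fun acc x => PySem.List.insertBy
        (fun a b => decide ((if p a then (0:Int) else 1) < (if p b then (0:Int) else 1))) x acc) ([] ++ []) := rfl
  rw [h0, key xs [] [] (by simp) (by simp)]
  simp

-- the binary-key sort of A is the stable partition by "rank == preferred"
theorem sorted_rank_key (xs : List (List (String × String))) :
    PySem.List.sorted xs rank_key false
      = xs.filter (fun it => dget it "rank" == some "preferred")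
        ++ xs.filter (fun it => !(dget it "rank" == some "preferred")) :=
  sorted_binary (fun it => dget it "rank" == some "preferred") xs

-- ---- generic dedup (PySem.Set) facts ----

-- find? over a foldl of Set.add sees the first hit, in the accumulator first
theorem find?_foldl_add {α : Type} [BEq α] [LawfulBEq α] (q : α → Bool) (xs acc : List α) :
    ((xs.foldl PySem.Set.add acc : List α).find? q) = (acc.find? q).or (xs.find? q) := by
  induction xs generalizing acc with
  | nil => simp
  | cons x xs ih =>
    rw [List.foldl_cons]
    by_cases hc : acc.contains x = true
    · have hmem : x ∈ acc := List.contains_iff_mem.1 hc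
      have hadd : PySem.Set.add acc x = acc := by
        simp [PySem.Set.add, PySem.Set.contains, hmem]
      rw [hadd, ih]
      cases hq : q x with
      | true =>
        have hs : (acc.find? q).isSome := List.find?_isSome.2 ⟨x, hmem, hq⟩
        obtain ⟨v, hv⟩ := Option.isSome_iff_exists.1 hs
        simp [hv, hq]
      | false =>
        simp [hq]
    · have hnm : x ∉ acc := fun h => hc (List.contains_iff_mem.2 h)
      have hadd : PySem.Set.add acc x = acc ++ [x] := by
        simp [PySem.Set.add, PySem.Set.contains, hnm]
      rw [hadd, ih, List.find?_append]
      cases hq : q x with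
      | true => simp [hq]
      | false => simp [hq]

-- find? over the dedup (first occurrences) of a list is find? over the list
theorem find?_dedup {α : Type} [BEq α] [LawfulBEq α] (q : α → Bool) (xs : List α) :
    (PySem.List.dedup xs).find? q = xs.find? q := by
  have := find?_foldl_add q xs []
  simpa [PySem.List.dedup, PySem.Set.ofList, PySem.Set.empty] using this

theorem foldl_add_of_nodup {α : Type} [BEq α] [LawfulBEq α] (xs acc : List α)
    (hd : ∀ x ∈ xs, x ∉ acc) (hn : xs.Nodup) :
    (xs.foldl PySem.Set.add acc : List α) = acc ++ xs := by
  induction xs generalizing acc with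
  | nil => simp
  | cons x xs ih =>
    have hxacc : x ∉ acc := hd x (by simp)
    rw [List.foldl_cons, show PySem.Set.add acc x = acc ++ [x] by
      simp [PySem.Set.add, PySem.Set.contains, hxacc]]
    have hd' : ∀ y ∈ xs, y ∉ acc ++ [x] := by
      intro y hy hmem
      rcases List.mem_append.1 hmem with h | h
      · exact hd y (List.mem_cons_of_mem _ hy) h
      · rw [List.mem_singleton] at h
        subst h
        exact (List.nodup_cons.1 hn).1 hy
    rw [ih (acc ++ [x]) hd' (List.Nodup.of_cons hn)]
    simp

theorem dedup_eq_self_of_nodup {α : Type} [BEq α] [LawfulBEq α] (xs : List α) (hn : xs.Nodup) :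
    PySem.List.dedup xs = xs := by
  simpa [PySem.List.dedup, PySem.Set.ofList, PySem.Set.empty] using
    foldl_add_of_nodup xs [] (by simp) hn

theorem nodup_dedup {α : Type} [BEq α] [LawfulBEq α] (xs : List α) :
    (PySem.List.dedup xs).Nodup := by
  simpa [PySem.List.dedup] using PySem.Set.nodup_ofList xs

theorem foldl_add_sublist {α : Type} [BEq α] (xs acc : List α) :
    ∃ l, (xs.foldl PySem.Set.add acc : List α) = acc ++ l ∧ l.Sublist xs := by
  induction xs generalizing acc with
  | nil => exact ⟨[], by simp, by simp⟩
  | cons x xs ih =>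
    rw [List.foldl_cons]
    by_cases hc : acc.contains x = true
    · have hadd : PySem.Set.add acc x = acc := by
        simp [PySem.Set.add, PySem.Set.contains, hc]
      rw [hadd]
      obtain ⟨l, h1, h2⟩ := ih acc
      exact ⟨l, h1, h2.cons _⟩
    · have hadd : PySem.Set.add acc x = acc ++ [x] := by
        simp [PySem.Set.add, PySem.Set.contains, hc]
      rw [hadd]
      obtain ⟨l, h1, h2⟩ := ih (acc ++ [x])
      exact ⟨x :: l, by simp [h1], h2.cons₂ _⟩

-- dedup is a sublist of the original
theorem dedup_sublist {α : Type} [BEq α] (xs : List α) :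
    (PySem.List.dedup xs).Sublist xs := by
  obtain ⟨l, h1, h2⟩ := foldl_add_sublist xs []
  simpa [PySem.List.dedup, PySem.Set.ofList, PySem.Set.empty, h1] using h2

theorem dedup_length_eq_iff_nodup {α : Type} [BEq α] [LawfulBEq α] (xs : List α) :
    (PySem.List.dedup xs).length = xs.length ↔ xs.Nodup := by
  constructor
  · intro h
    have heq := (dedup_sublist xs).eq_of_length h
    rw [← heq]
    exact nodup_dedup xs
  · intro h
    rw [dedup_eq_self_of_nodup xs h]

-- appending one element to the list being deduplicated
theorem dedup_append_single {α : Type} [BEq α] [LawfulBEq α] (s : List α) (c : α) :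
    PySem.List.dedup (s ++ [c])
      = if c ∈ s then PySem.List.dedup s else PySem.List.dedup s ++ [c] := by
  have h1 : PySem.List.dedup (s ++ [c]) = PySem.Set.add (PySem.List.dedup s) c := by
    simp [PySem.List.dedup, PySem.Set.ofList, List.foldl_append]
  rw [h1]
  by_cases hm : c ∈ s
  · rw [if_pos hm]
    simp [PySem.Set.add, PySem.Set.contains, hm]
  · rw [if_neg hm]
    simp [PySem.Set.add, PySem.Set.contains, hm]

-- ---- small list facts ----

theorem find?_congr_mem {α : Type} {p q : α → Bool} (l : List α)
    (h : ∀ x ∈ l, p x = q x) : l.find? p = l.find? q := by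
  induction l with
  | nil => rfl
  | cons x l ih =>
    rw [List.find?_cons, List.find?_cons, h x (by simp)]
    cases q x with
    | true => rfl
    | false => exact ih (fun y hy => h y (by simp [hy]))

theorem pyGet?_zero {α : Type} (l : List α) : PySem.List.pyGet? l 0 = l.head? := by
  cases l <;> simp [PySem.List.pyGet?, PySem.List.pyIdx?]

theorem find?_eq_head?_filter {α : Type} (p : α → Bool) (l : List α) :
    l.find? p = (l.filter p).head? := by
  induction l with
  | nil => rfl
  | cons x l ih =>
    rw [List.find?_cons, List.filter_cons]
    cases hp : p x with
    | true => simp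
    | false => simpa using ih

theorem head?_append_single {α : Type} (k : List α) (x : α) :
    (k ++ [x]).head? = if (k.head?).isNone then some x else k.head? := by
  cases k <;> simp

theorem headI_append_left {α : Type} [Inhabited α] (l m : List α) (h : l ≠ []) :
    (l ++ m).headI = l.headI := by
  cases l with
  | nil => exact absurd rfl h
  | cons a l => simp

theorem find?_append_single {α : Type} (q : α → Bool) (k : List α) (x : α) :
    (k ++ [x]).find? q = if (k.find? q).isNone && q x then some x else k.find? q := by
  rw [List.find?_append]
  cases h : k.find? q <;> cases hq : q x <;> simp [List.find?_cons, hq]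

-- ---- the grouping dict of A's phase 2 ----

theorem grp_getD {α κ : Type} [BEq κ] [LawfulBEq κ] (s : α → κ) (t : List α) (c : κ) :
    (t.foldl (fun d it => d.modify (s it) [] (fun v => v ++ [it])) PySem.Dict.empty).getD c []
      = t.filter (fun it => s it == c) := by
  rw [show (t.foldl (fun d it => d.modify (s it) [] (fun v => v ++ [it])) PySem.Dict.empty)
      = ((t.map (fun it => (s it, it))).foldl
          (fun d p => d.modify p.1 [] (fun v => v ++ [p.2])) PySem.Dict.empty) by
    rw [List.foldl_map]]
  rw [PySem.Dict.getD_foldl_modify_append, PySem.Dict.getD_empty, List.nil_append,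
    List.filter_map, List.map_map]
  simp [Function.comp_def]

theorem grp_keys {α κ : Type} [BEq κ] [LawfulBEq κ] (s : α → κ) (t : List α) :
    (t.foldl (fun d it => d.modify (s it) [] (fun v => v ++ [it])) PySem.Dict.empty).keys
      = PySem.List.dedup (t.map s) := by
  rw [PySem.Dict.keys_foldl_modify_key t s [] (fun _ it => (fun v => v ++ [it])) PySem.Dict.empty]
  simp [PySem.Dict.keys_empty, PySem.Set.update, PySem.Set.ofList, PySem.List.dedup, PySem.Set.empty]

theorem grp_nodup {α κ : Type} [BEq κ] [LawfulBEq κ] (s : α → κ) (t : List α) :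
    (t.foldl (fun d it => d.modify (s it) [] (fun v => v ++ [it])) PySem.Dict.empty).keys.Nodup :=
  PySem.Dict.nodup_keys_foldl_modify_key t s [] (fun _ it => (fun v => v ++ [it]))
    PySem.Dict.empty PySem.Dict.nodup_keys_empty

-- length of a key-filter is the count of the key among the mapped keys
theorem count_bridge {α κ : Type} [BEq κ] [LawfulBEq κ] (s : α → κ) (t : List α) (c : κ) :
    (t.filter (fun it => s it == c)).length = (t.map s).count c := by
  rw [List.count_eq_countP, List.countP_map, ← List.countP_eq_length_filter]
  rfl

-- phase 2 of A: the grouping-dict disambiguation in canonical (dedup/count/find?) form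
theorem phase2_eq (t : List (List (String × String))) :
    (if (group_by_source t).size > 2 then none
      else if (group_by_source t).values.all (fun v => v.length == 1) then
        match (group_by_source t).get? "osmwiki:P8" with
        | some v => if v.length = 0 then PySem.List.pyGet? t 0 else PySem.List.pyGet? v 0
        | none => PySem.List.pyGet? t 0
      else
        match (group_by_source t).values.find? (fun v => v.length == 1) with
        | some v => PySem.List.pyGet? v 0
        | none => none)
    = (if (PySem.List.dedup (t.map src_of)).length > 2 then none
       else if (PySem.List.dedup (t.map src_of)).length = (t.map src_of).length then
         match t.find? (fun it => src_of it == "osmwiki:P8") with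
         | some it => some it
         | none => PySem.List.pyGet? t 0
       else
         match t.find? (fun it => (t.map src_of).count (src_of it) == 1) with
         | some it => some it
         | none => none) := by
  simp only [group_by_source, show src_of = (fun it => (dget it "source").getD "") from rfl]
  have hnd := grp_nodup (fun it => (dget it "source").getD "") t
  have hsz : (t.foldl
      (fun (d : PySem.Dict String (List (List (String × String)))) item =>
        d.modify ((dget item "source").getD "") [] (fun v => v ++ [item])) PySem.Dict.empty).size
      = (PySem.List.dedup (t.map (fun it => (dget it "source").getD ""))).length := by
    rw [← grp_keys (fun it => (dget it "source").getD "") t]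
    simp [PySem.Dict.size, PySem.Dict.keys]
  have hvals : (t.foldl
      (fun (d : PySem.Dict String (List (List (String × String)))) item =>
        d.modify ((dget item "source").getD "") [] (fun v => v ++ [item])) PySem.Dict.empty).values
      = (PySem.List.dedup (t.map (fun it => (dget it "source").getD ""))).map
          (fun c => t.filter (fun it => (dget it "source").getD "" == c)) := by
    rw [PySem.Dict.values_eq_map_keys _ hnd [], grp_keys]
    simp only [grp_getD]
  rw [hsz, hvals]
  by_cases h2 : (PySem.List.dedup (t.map (fun it => (dget it "source").getD ""))).length > 2
  · rw [if_pos h2, if_pos h2]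
  · rw [if_neg h2, if_neg h2]
    by_cases hn : (t.map (fun it => (dget it "source").getD "")).Nodup
    · have hall : ((PySem.List.dedup (t.map (fun it => (dget it "source").getD ""))).map
          (fun c => t.filter (fun it => (dget it "source").getD "" == c))).all
          (fun v => v.length == 1) = true := by
        rw [List.all_eq_true]
        intro v hv
        obtain ⟨c, hc, rfl⟩ := List.mem_map.1 hv
        rw [show (t.filter (fun it => (dget it "source").getD "" == c)).length
            = (t.map (fun it => (dget it "source").getD "")).count c from count_bridge _ _ _]
        have := List.nodup_iff_count_eq_one.1 hn c ((PySem.List.mem_dedup _ _).1 hc)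
        simp [this]
      rw [if_pos hall, if_pos ((dedup_length_eq_iff_nodup _).2 hn)]
      by_cases how : "osmwiki:P8" ∈ t.map (fun it => (dget it "source").getD "")
      · have hmemk : "osmwiki:P8" ∈ (t.foldl
            (fun (d : PySem.Dict String (List (List (String × String)))) item =>
              d.modify ((dget item "source").getD "") [] (fun v => v ++ [item])) PySem.Dict.empty).keys := by
          rw [grp_keys]
          exact (PySem.List.mem_dedup _ _).2 how
        have hcont := (PySem.Dict.contains_iff_mem_keys _ _).2 hmemk
        have hsome : ((t.foldl
            (fun (d : PySem.Dict String (List (List (String × String)))) item =>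
              d.modify ((dget item "source").getD "") [] (fun v => v ++ [item])) PySem.Dict.empty).get? "osmwiki:P8").isSome := by
          rw [← PySem.Dict.contains_eq_isSome_get?]
          exact hcont
        obtain ⟨v, hv⟩ := Option.isSome_iff_exists.1 hsome
        have hveq : v = t.filter (fun it => (dget it "source").getD "" == "osmwiki:P8") := by
          have h := PySem.Dict.getD_of_get?_eq_some _ [] hv
          rw [grp_getD] at h
          exact h.symm
        rw [hv, hveq]
        obtain ⟨it0, hit0, hsit0⟩ := List.mem_map.1 how
        show (if (t.filter (fun it => (dget it "source").getD "" == "osmwiki:P8")).length = 0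
            then PySem.List.pyGet? t 0
            else PySem.List.pyGet? (t.filter (fun it => (dget it "source").getD "" == "osmwiki:P8")) 0)
          = match t.find? (fun it => (dget it "source").getD "" == "osmwiki:P8") with
            | some it => some it
            | none => PySem.List.pyGet? t 0
        have hmemf : it0 ∈ t.filter (fun it => (dget it "source").getD "" == "osmwiki:P8") :=
          List.mem_filter.2 ⟨hit0, by simp [hsit0]⟩
        have hne : ¬ (t.filter (fun it => (dget it "source").getD "" == "osmwiki:P8")).length = 0 := by
          rw [List.length_eq_zero_iff]
          intro h
          rw [h] at hmemf
          exact absurd hmemf (List.not_mem_nil)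
        rw [if_neg hne, pyGet?_zero, ← find?_eq_head?_filter]
        have hfs : (t.find? (fun it => (dget it "source").getD "" == "osmwiki:P8")).isSome :=
          List.find?_isSome.2 ⟨it0, hit0, by simp [hsit0]⟩
        obtain ⟨it1, hf1⟩ := Option.isSome_iff_exists.1 hfs
        rw [hf1]
      · have hnone : (t.foldl
            (fun (d : PySem.Dict String (List (List (String × String)))) item =>
              d.modify ((dget item "source").getD "") [] (fun v => v ++ [item])) PySem.Dict.empty).get? "osmwiki:P8" = none := by
          rw [PySem.Dict.get?_eq_none_iff_not_mem_keys, grp_keys]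
          intro h
          exact how ((PySem.List.mem_dedup _ _).1 h)
        have hfn : t.find? (fun it => (dget it "source").getD "" == "osmwiki:P8") = none := by
          rw [List.find?_eq_none]
          intro it hit hp
          exact how (List.mem_map.2 ⟨it, hit, by simpa using hp⟩)
        rw [hnone, hfn]
    · have hnall : ¬ ∀ a ∈ (t.map (fun it => (dget it "source").getD "")),
          (t.map (fun it => (dget it "source").getD "")).count a = 1 :=
        fun h => hn (List.nodup_iff_count_eq_one.2 h)
      have hallf : ((PySem.List.dedup (t.map (fun it => (dget it "source").getD ""))).map
          (fun c => t.filter (fun it => (dget it "source").getD "" == c))).all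
          (fun v => v.length == 1) = false := by
        rw [Bool.eq_false_iff]
        intro hforall
        apply hnall
        intro a ha
        have hmem : (t.filter (fun it => (dget it "source").getD "" == a)) ∈
            ((PySem.List.dedup (t.map (fun it => (dget it "source").getD ""))).map
              (fun c => t.filter (fun it => (dget it "source").getD "" == c))) :=
          List.mem_map.2 ⟨a, (PySem.List.mem_dedup _ _).2 ha, rfl⟩
        have := List.all_eq_true.1 hforall _ hmem
        rw [show (t.filter (fun it => (dget it "source").getD "" == a)).length
            = (t.map (fun it => (dget it "source").getD "")).count a from count_bridge _ _ _] at this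
        simpa using this
      rw [hallf]
      rw [if_neg (by simp)]
      rw [if_neg (fun h => hn ((dedup_length_eq_iff_nodup _).1 h))]
      rw [List.find?_map]
      rw [find?_congr_mem _ (fun c _ => by
        show ((fun v => v.length == 1) ∘ (fun c => t.filter (fun it => (dget it "source").getD "" == c))) c
            = ((t.map (fun it => (dget it "source").getD "")).count c == 1)
        simp only [Function.comp_apply]
        rw [count_bridge])]
      rw [find?_dedup]
      rw [List.find?_map]
      rw [show ((fun c => (t.map (fun it => (dget it "source").getD "")).count c == 1)
            ∘ (fun it => (dget it "source").getD ""))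
          = (fun it => (t.map (fun it => (dget it "source").getD "")).count ((dget it "source").getD "") == 1)
          from rfl]
      cases hf : t.find? (fun it =>
          (t.map (fun it => (dget it "source").getD "")).count ((dget it "source").getD "") == 1) with
      | none => rfl
      | some it0 =>
        have hq := List.find?_some hf
        have hcount : (t.map (fun it => (dget it "source").getD "")).count ((dget it0 "source").getD "") = 1 := by
          simpa using hq
        have hlen1 : (t.filter (fun it => (dget it "source").getD "" == (dget it0 "source").getD "")).length = 1 := by
          rw [count_bridge _ _ _]
          exact hcount
        have hmemf : it0 ∈ t.filter (fun it => (dget it "source").getD "" == (dget it0 "source").getD "") :=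
          List.mem_filter.2 ⟨List.mem_of_find?_eq_some hf, by simp⟩
        obtain ⟨a, ha⟩ := List.length_eq_one_iff.1 hlen1
        rw [ha] at hmemf
        rw [List.mem_singleton] at hmemf
        subst hmemf
        show PySem.List.pyGet?
            (t.filter (fun it => (dget it "source").getD "" == (dget it0 "source").getD "")) 0 = some it0
        rw [ha, pyGet?_zero]
        rfl

-- ---- B-side machinery: characterizing the streaming fold ----

-- the URL-dedup fold only appends (a sublist of its input) after the accumulator
theorem dstep_acc (xs : List (List (String × String)))
    (acc : List (List (String × String))) (s : PySem.Set (Option String)) :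
    ∃ e, (xs.foldl dstep (acc, s)).1 = acc ++ e ∧ e.Sublist xs := by
  induction xs generalizing acc s with
  | nil => exact ⟨[], by simp, by simp⟩
  | cons x xs ih =>
    rw [List.foldl_cons]
    by_cases hc : s.contains (dget x "url") = true
    · rw [show dstep (acc, s) x = (acc, s) by
        simp only [dstep, hc, if_true]]
      obtain ⟨e, h1, h2⟩ := ih acc s
      exact ⟨e, h1, h2.cons _⟩
    · rw [show dstep (acc, s) x = (acc ++ [x], s.add (dget x "url")) by
        simp only [dstep, hc, if_false, Bool.false_eq_true]]
      obtain ⟨e, h1, h2⟩ := ih (acc ++ [x]) (s.add (dget x "url"))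
      exact ⟨x :: e, by simp [h1], h2.cons₂ _⟩

theorem dedup_by_url_append (l₁ l₂ : List (List (String × String))) :
    ∃ e, dedup_by_url (l₁ ++ l₂) = dedup_by_url l₁ ++ e ∧ e.Sublist l₂ := by
  unfold dedup_by_url
  rw [List.foldl_append]
  obtain ⟨e, h1, h2⟩ := dstep_acc l₂ (l₁.foldl dstep ([], PySem.Set.empty)).1
    (l₁.foldl dstep ([], PySem.Set.empty)).2
  exact ⟨e, by rw [← h1], h2⟩

theorem dedup_by_url_cons (x : List (String × String)) (xs : List (List (String × String))) :
    ∃ e, dedup_by_url (x :: xs) = x :: e ∧ e.Sublist xs := by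
  unfold dedup_by_url
  rw [List.foldl_cons, show dstep ([], PySem.Set.empty) x
      = ([x], PySem.Set.add PySem.Set.empty (dget x "url")) by
    simp [dstep, PySem.Set.contains, PySem.Set.empty]]
  obtain ⟨e, h1, h2⟩ := dstep_acc xs [x] (PySem.Set.add PySem.Set.empty (dget x "url"))
  exact ⟨e, by simpa [PySem.Set.add, PySem.Set.empty, PySem.Set.contains] using h1, h2⟩

-- the unique top-ranked survivors after p has been consumed
def keptOf (tr : Option String) (p : List (List (String × String))) :
    List (List (String × String)) :=
  ((p.foldl dstep ([], PySem.Set.empty)).1).filter (fun it => dget it "rank" == tr)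

-- the slot table built from the kept list: one entry per distinct source, capped at two
def mkSlots (k : List (List (String × String))) (l : List String) :
    List (String × Int × List (String × String)) :=
  l.map (fun c => (c, (((k.map src_of).count c : Nat) : Int),
    (k.filter (fun it => src_of it == c)).headI))

-- the B fold state determined by a seen set and a kept list
def mkState (sn : PySem.Set (Option String)) (k : List (List (String × String))) : StB :=
  { seen := sn
  , first := k.head?
  , total := ((k.length : Nat) : Int)
  , slots := mkSlots k ((PySem.List.dedup (k.map src_of)).take 2)
  , overflow := decide ((PySem.List.dedup (k.map src_of)).length > 2)
  , osm := k.find? (fun it => src_of it == "osmwiki:P8") }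

-- the intended final state of B's fold after consuming p
def specSt (tr : Option String) (p : List (List (String × String))) : StB :=
  mkState ((p.foldl dstep ([], PySem.Set.empty)).2) (keptOf tr p)

theorem filter_src_eq_nil (k : List (List (String × String))) (c : String)
    (h : c ∉ k.map src_of) : k.filter (fun it => src_of it == c) = [] := by
  rw [List.filter_eq_nil_iff]
  intro it hit hbeq
  exact h (List.mem_map.2 ⟨it, hit, by simpa using hbeq⟩)

theorem filter_src_ne_nil (k : List (List (String × String))) (c : String)
    (h : c ∈ k.map src_of) : k.filter (fun it => src_of it == c) ≠ [] := by
  obtain ⟨it, hit, rfl⟩ := List.mem_map.1 h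
  intro hnil
  have hm : it ∈ k.filter (fun it' => src_of it' == src_of it) :=
    List.mem_filter.2 ⟨hit, by simp⟩
  rw [hnil] at hm
  exact absurd hm List.not_mem_nil

-- the inner slot loop on a nodup slot table: increments the matching slot or reports none
theorem bump_map (l : List String) (f : String → Int) (g : String → List (String × String))
    (c : String) (hn : l.Nodup) :
    bump_slots (l.map (fun c' => (c', f c', g c'))) c =
      if c ∈ l then some (l.map (fun c' => (c', (if c' = c then f c' + 1 else f c'), g c')))
      else none := by
  induction l with
  | nil => simp [bump_slots]
  | cons a l ih =>
    rw [List.map_cons]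
    by_cases hac : a = c
    · subst hac
      have hnotin : a ∉ l := (List.nodup_cons.1 hn).1
      rw [show bump_slots ((a, f a, g a) :: l.map (fun c' => (c', f c', g c'))) a
          = some ((a, f a + 1, g a) :: l.map (fun c' => (c', f c', g c'))) by
        simp [bump_slots]]
      rw [if_pos (List.mem_cons_self)]
      rw [List.map_cons, if_pos rfl]
      congr 2
      apply List.map_congr_left
      intro b hb
      have hba : ¬ b = a := fun h => hnotin (h ▸ hb)
      simp [hba]
    · have hbeq : (a == c) = false := by simp [hac]
      rw [show bump_slots ((a, f a, g a) :: l.map (fun c' => (c', f c', g c'))) c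
          = (bump_slots (l.map (fun c' => (c', f c', g c'))) c).map ((a, f a, g a) :: ·) by
        simp [bump_slots, hbeq]]
      rw [ih (List.nodup_cons.1 hn).2]
      by_cases hcl : c ∈ l
      · rw [if_pos hcl, if_pos (List.mem_cons_of_mem _ hcl)]
        rw [List.map_cons, if_neg hac]
        rfl
      · rw [if_neg hcl, if_neg (by simp [Ne.symm, hac, hcl] : ¬ c ∈ a :: l)]
        rfl

-- the inner slot loop on a nodup slot table, instantiated to a slot table
theorem bump_mkSlots (k : List (List (String × String))) (l : List String) (c : String)
    (hn : l.Nodup) :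
    bump_slots (mkSlots k l) c =
      if c ∈ l then
        some (l.map (fun c' => (c',
          (if c' = c then (((k.map src_of).count c' : Nat) : Int) + 1
           else (((k.map src_of).count c' : Nat) : Int)),
          (k.filter (fun it => src_of it == c')).headI)))
      else none :=
  bump_map l (fun c' => (((k.map src_of).count c' : Nat) : Int))
    (fun c' => (k.filter (fun it => src_of it == c')).headI) c hn

-- a url already seen: the step is a no-op
theorem stepB_skip (tr : Option String) (x : List (String × String))
    (sn : PySem.Set (Option String)) (k : List (List (String × String)))
    (hc : sn.contains (dget x "url") = true) :
    stepB tr (mkState sn k) x = mkState sn k := by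
  have hm : dget x "url" ∈ sn := by simpa [PySem.Set.contains] using hc
  simp [stepB, mkState, hm]

-- a new url with the wrong rank: only the seen set grows
theorem stepB_wrong_rank (tr : Option String) (x : List (String × String))
    (sn : PySem.Set (Option String)) (k : List (List (String × String)))
    (hc : sn.contains (dget x "url") = false)
    (hr : (dget x "rank" == tr) = false) :
    stepB tr (mkState sn k) x = mkState (sn.add (dget x "url")) k := by
  have hm : dget x "url" ∉ sn := by simpa [PySem.Set.contains] using hc
  have hne : ¬ dget x "rank" = tr := by simpa using hr
  simp [stepB, mkState, hm, hne]

-- appending a kept item whose source already owns a slot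
theorem mkSlots_append_mem (k : List (List (String × String))) (x : List (String × String))
    (hmem : src_of x ∈ (PySem.List.dedup (k.map src_of)).take 2) :
    ((PySem.List.dedup (k.map src_of)).take 2).map (fun c' => (c',
        (if c' = src_of x then (((k.map src_of).count c' : Nat) : Int) + 1
         else (((k.map src_of).count c' : Nat) : Int)),
        (k.filter (fun it => src_of it == c')).headI))
      = mkSlots (k ++ [x]) ((PySem.List.dedup ((k ++ [x]).map src_of)).take 2) := by
  have hs : (k ++ [x]).map src_of = k.map src_of ++ [src_of x] := by simp
  have hcs : src_of x ∈ k.map src_of :=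
    (PySem.List.mem_dedup _ _).1 (List.mem_of_mem_take hmem)
  have hdd : PySem.List.dedup ((k ++ [x]).map src_of) = PySem.List.dedup (k.map src_of) := by
    rw [hs, dedup_append_single, if_pos hcs]
  rw [hdd]
  unfold mkSlots
  apply List.map_congr_left
  intro c' hc'
  rw [hs]
  refine Prod.ext rfl (Prod.ext ?_ ?_)
  · show (if c' = src_of x then (((k.map src_of).count c' : Nat) : Int) + 1
        else (((k.map src_of).count c' : Nat) : Int))
      = (((k.map src_of ++ [src_of x]).count c' : Nat) : Int)
    rw [List.count_append]
    by_cases hcc : c' = src_of x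
    · subst hcc
      simp
    · have hcc' : ¬ src_of x = c' := fun h => hcc h.symm
      simp [List.count_cons, hcc, hcc']
  · show (k.filter (fun it => src_of it == c')).headI
      = ((k ++ [x]).filter (fun it => src_of it == c')).headI
    rw [List.filter_append]
    by_cases hcc : src_of x = c'
    · rw [show [x].filter (fun it => src_of it == c') = [x] by simp [hcc]]
      rw [headI_append_left]
      exact filter_src_ne_nil k c' (hcc ▸ hcs)
    · rw [show [x].filter (fun it => src_of it == c') = [] by simp [hcc]]
      rw [List.append_nil]

-- appending a kept item with a new source while both slots are taken
theorem mkSlots_append_full (k : List (List (String × String))) (x : List (String × String))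
    (hmem : src_of x ∉ (PySem.List.dedup (k.map src_of)).take 2)
    (hlen : ((PySem.List.dedup (k.map src_of)).take 2).length = 2) :
    mkSlots (k ++ [x]) ((PySem.List.dedup ((k ++ [x]).map src_of)).take 2)
      = mkSlots k ((PySem.List.dedup (k.map src_of)).take 2) := by
  have hs : (k ++ [x]).map src_of = k.map src_of ++ [src_of x] := by simp
  have hge : 2 ≤ (PySem.List.dedup (k.map src_of)).length := by
    by_contra hlt
    rw [List.take_of_length_le (by omega)] at hlen
    omega
  have htk : (PySem.List.dedup ((k ++ [x]).map src_of)).take 2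
      = (PySem.List.dedup (k.map src_of)).take 2 := by
    rw [hs, dedup_append_single]
    by_cases hcs : src_of x ∈ k.map src_of
    · rw [if_pos hcs]
    · rw [if_neg hcs, List.take_append_of_le_length hge]
  rw [htk]
  unfold mkSlots
  apply List.map_congr_left
  intro c' hc'
  have hcc : ¬ src_of x = c' := fun h => hmem (h ▸ hc')
  rw [hs]
  refine Prod.ext rfl (Prod.ext ?_ ?_)
  · show (((k.map src_of ++ [src_of x]).count c' : Nat) : Int)
      = (((k.map src_of).count c' : Nat) : Int)
    rw [List.count_append]
    simp [List.count_cons, hcc]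
  · show ((k ++ [x]).filter (fun it => src_of it == c')).headI
      = (k.filter (fun it => src_of it == c')).headI
    rw [List.filter_append, show [x].filter (fun it => src_of it == c') = [] by simp [hcc],
      List.append_nil]

-- the overflow flag turns (and stays) on exactly when a third source exists
theorem overflow_append_full (k : List (List (String × String))) (x : List (String × String))
    (hmem : src_of x ∉ (PySem.List.dedup (k.map src_of)).take 2)
    (hlen : ((PySem.List.dedup (k.map src_of)).take 2).length = 2) :
    decide ((PySem.List.dedup ((k ++ [x]).map src_of)).length > 2) = true := by
  have hs : (k ++ [x]).map src_of = k.map src_of ++ [src_of x] := by simp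
  have hge : 2 ≤ (PySem.List.dedup (k.map src_of)).length := by
    by_contra hlt
    rw [List.take_of_length_le (by omega)] at hlen
    omega
  rw [hs, dedup_append_single]
  by_cases hcs : src_of x ∈ k.map src_of
  · rw [if_pos hcs]
    have hdd : src_of x ∈ PySem.List.dedup (k.map src_of) := (PySem.List.mem_dedup _ _).2 hcs
    have hgt : 2 < (PySem.List.dedup (k.map src_of)).length := by
      by_contra hle
      rw [List.take_of_length_le (by omega)] at hmem
      exact hmem hdd
    simpa using hgt
  · rw [if_neg hcs]
    simp only [List.length_append, List.length_cons, List.length_nil]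
    simp only [decide_eq_true_eq]
    omega

-- appending a kept item with a new source while a slot is free
theorem mkSlots_append_new (k : List (List (String × String))) (x : List (String × String))
    (hmem : src_of x ∉ (PySem.List.dedup (k.map src_of)).take 2)
    (hlen : ((PySem.List.dedup (k.map src_of)).take 2).length ≠ 2) :
    mkSlots (k ++ [x]) ((PySem.List.dedup ((k ++ [x]).map src_of)).take 2)
      = mkSlots k ((PySem.List.dedup (k.map src_of)).take 2) ++ [(src_of x, 1, x)] := by
  have hs : (k ++ [x]).map src_of = k.map src_of ++ [src_of x] := by simp
  have hle : (PySem.List.dedup (k.map src_of)).length ≤ 1 := by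
    have hlt : ((PySem.List.dedup (k.map src_of)).take 2).length
        = min 2 (PySem.List.dedup (k.map src_of)).length := List.length_take
    omega
  have htk : (PySem.List.dedup (k.map src_of)).take 2 = PySem.List.dedup (k.map src_of) :=
    List.take_of_length_le (by omega)
  have hcs : src_of x ∉ k.map src_of := by
    intro h
    apply hmem
    rw [htk]
    exact (PySem.List.mem_dedup _ _).2 h
  have hdd : PySem.List.dedup ((k ++ [x]).map src_of)
      = PySem.List.dedup (k.map src_of) ++ [src_of x] := by
    rw [hs, dedup_append_single, if_neg hcs]
  have htk' : (PySem.List.dedup ((k ++ [x]).map src_of)).take 2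
      = PySem.List.dedup (k.map src_of) ++ [src_of x] := by
    rw [hdd]
    refine List.take_of_length_le ?_
    rw [List.length_append]
    simp only [List.length_cons, List.length_nil]
    omega
  rw [htk', htk]
  unfold mkSlots
  rw [List.map_append]
  congr 1
  · apply List.map_congr_left
    intro c' hc'
    have hcc : ¬ src_of x = c' := by
      intro h
      exact hcs (h ▸ (PySem.List.mem_dedup _ _).1 hc')
    rw [hs]
    refine Prod.ext rfl (Prod.ext ?_ ?_)
    · show (((k.map src_of ++ [src_of x]).count c' : Nat) : Int)
        = (((k.map src_of).count c' : Nat) : Int)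
      rw [List.count_append]
      simp [List.count_cons, hcc]
    · show ((k ++ [x]).filter (fun it => src_of it == c')).headI
        = (k.filter (fun it => src_of it == c')).headI
      rw [List.filter_append, show [x].filter (fun it => src_of it == c') = [] by simp [hcc],
        List.append_nil]
  · rw [List.map_singleton]
    rw [hs]
    have hcnt : (k.map src_of ++ [src_of x]).count (src_of x) = 1 := by
      rw [List.count_append, List.count_eq_zero.2 hcs]
      simp
    rw [hcnt]
    rw [List.filter_append, filter_src_eq_nil k _ hcs, List.nil_append,
      show [x].filter (fun it => src_of it == src_of x) = [x] by simp]
    simp [List.headI]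

-- the overflow flag stays off when a free slot is filled
theorem overflow_append_new (k : List (List (String × String))) (x : List (String × String))
    (hmem : src_of x ∉ (PySem.List.dedup (k.map src_of)).take 2)
    (hlen : ((PySem.List.dedup (k.map src_of)).take 2).length ≠ 2) :
    decide ((PySem.List.dedup ((k ++ [x]).map src_of)).length > 2)
      = decide ((PySem.List.dedup (k.map src_of)).length > 2) := by
  have hle : (PySem.List.dedup (k.map src_of)).length ≤ 1 := by
    have hlt : ((PySem.List.dedup (k.map src_of)).take 2).length
        = min 2 (PySem.List.dedup (k.map src_of)).length := List.length_take
    omega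
  have hs : (k ++ [x]).map src_of = k.map src_of ++ [src_of x] := by simp
  rw [hs, dedup_append_single]
  by_cases hcs : src_of x ∈ k.map src_of
  · rw [if_pos hcs]
  · rw [if_neg hcs]
    have hle' : (PySem.Set.ofList (k.map src_of) : List String).length ≤ 1 := by
      simpa [PySem.List.dedup] using hle
    simp only [List.length_append, List.length_cons, List.length_nil]
    rw [decide_eq_decide]
    simp only [PySem.List.dedup] at *
    omega

-- a new url with the top rank: the kept list grows by x
theorem stepB_keep (tr : Option String) (x : List (String × String))
    (sn : PySem.Set (Option String)) (k : List (List (String × String)))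
    (hc : sn.contains (dget x "url") = false)
    (hr : (dget x "rank" == tr) = true) :
    stepB tr (mkState sn k) x = mkState (sn.add (dget x "url")) (k ++ [x]) := by
  have hm : dget x "url" ∉ sn := by simpa [PySem.Set.contains] using hc
  have heq : dget x "rank" = tr := by simpa using hr
  have hnl : ((PySem.List.dedup (k.map src_of)).take 2).Nodup :=
    (nodup_dedup _).sublist (List.take_sublist _ _)
  simp only [stepB, mkState]
  rw [if_neg (by simpa [PySem.Set.contains] using hm : ¬ sn.contains (dget x "url") = true)]
  rw [if_neg (by simp [heq] : ¬ (dget x "rank" != tr) = true)]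
  rw [bump_mkSlots k _ (src_of x) hnl]
  by_cases hmem : src_of x ∈ (PySem.List.dedup (k.map src_of)).take 2
  · rw [if_pos hmem]
    have hcs : src_of x ∈ k.map src_of :=
      (PySem.List.mem_dedup _ _).1 (List.mem_of_mem_take hmem)
    have hdd : PySem.List.dedup ((k ++ [x]).map src_of) = PySem.List.dedup (k.map src_of) := by
      rw [show (k ++ [x]).map src_of = k.map src_of ++ [src_of x] by simp,
        dedup_append_single, if_pos hcs]
    simp only [StB.mk.injEq]
    refine ⟨trivial, (head?_append_single k x).symm, by simp, mkSlots_append_mem k x hmem,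
      by rw [hdd], (find?_append_single _ k x).symm⟩
  · rw [if_neg hmem]
    by_cases hl2 : ((PySem.List.dedup (k.map src_of)).take 2).length = 2
    · rw [if_pos (by simp only [mkSlots, List.length_map, beq_iff_eq]; exact hl2 :
        ((mkSlots k ((PySem.List.dedup (k.map src_of)).take 2)).length == 2) = true)]
      simp only [StB.mk.injEq]
      refine ⟨trivial, (head?_append_single k x).symm, by simp,
        (mkSlots_append_full k x hmem hl2).symm,
        (overflow_append_full k x hmem hl2).symm, (find?_append_single _ k x).symm⟩
    · rw [if_neg (by simp only [mkSlots, List.length_map]; simpa using hl2 :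
        ¬ ((mkSlots k ((PySem.List.dedup (k.map src_of)).take 2)).length == 2) = true)]
      simp only [StB.mk.injEq]
      refine ⟨trivial, (head?_append_single k x).symm, by simp,
        (mkSlots_append_new k x hmem hl2).symm,
        (overflow_append_new k x hmem hl2).symm, (find?_append_single _ k x).symm⟩

-- one step of B's fold preserves the state characterization
theorem step_spec (tr : Option String) (p : List (List (String × String)))
    (x : List (String × String)) :
    stepB tr (specSt tr p) x = specSt tr (p ++ [x]) := by
  unfold specSt keptOf
  rw [show (p ++ [x]).foldl dstep ([], PySem.Set.empty)
      = dstep (p.foldl dstep ([], PySem.Set.empty)) x by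
    rw [List.foldl_append, List.foldl_cons, List.foldl_nil]]
  by_cases hc : (p.foldl dstep ([], PySem.Set.empty)).2.contains (dget x "url") = true
  · rw [show dstep (p.foldl dstep ([], PySem.Set.empty)) x
        = p.foldl dstep ([], PySem.Set.empty) by
      simp only [dstep, hc, if_true]]
    exact stepB_skip tr x _ _ hc
  · rw [Bool.not_eq_true] at hc
    rw [show dstep (p.foldl dstep ([], PySem.Set.empty)) x
        = ((p.foldl dstep ([], PySem.Set.empty)).1 ++ [x],
           (p.foldl dstep ([], PySem.Set.empty)).2.add (dget x "url")) by
      simp only [dstep, hc, Bool.false_eq_true, if_false]]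
    rw [List.filter_append]
    cases hr : (dget x "rank" == tr) with
    | false =>
      rw [show [x].filter (fun it => dget it "rank" == tr) = [] by simp [hr]]
      rw [List.append_nil]
      exact stepB_wrong_rank tr x _ _ hc hr
    | true =>
      rw [show [x].filter (fun it => dget it "rank" == tr) = [x] by simp [hr]]
      exact stepB_keep tr x _ _ hc hr

theorem fold_spec (tr : Option String) (pool : List (List (String × String))) :
    pool.foldl (stepB tr) ⟨PySem.Set.empty, none, 0, [], false, none⟩ = specSt tr pool := by
  have hgen : ∀ (q p : List (List (String × String))),
      q.foldl (stepB tr) (specSt tr p) = specSt tr (p ++ q) := by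
    intro q
    induction q with
    | nil => intro p; simp
    | cons y q ih =>
      intro p
      rw [List.foldl_cons, step_spec, ih (p ++ [y])]
      simp
  have h0 : specSt tr [] = (⟨PySem.Set.empty, none, 0, [], false, none⟩ : StB) := by
    simp [specSt, keptOf, mkState, mkSlots, PySem.List.dedup, PySem.Set.ofList,
      PySem.Set.empty]
  rw [← h0, hgen pool []]
  simp

theorem keptOf_def (tr : Option String) (p : List (List (String × String))) :
    keptOf tr p = (dedup_by_url p).filter (fun it => dget it "rank" == tr) := rfl

-- reading the answer off the final state matches the canonical dedup/count/find? form
theorem dispatch_eq (tr : Option String) (pool : List (List (String × String))) :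
    (if (specSt tr pool).total = 1 then (specSt tr pool).first
     else if (specSt tr pool).overflow = true then none
     else if (specSt tr pool).slots.all (fun s => s.2.1 == 1) = true then
       match (specSt tr pool).osm with
       | some it => some it
       | none => (specSt tr pool).first
     else
       match (specSt tr pool).slots.find? (fun s => s.2.1 == 1) with
       | some s => some s.2.2
       | none => none)
    = (if (keptOf tr pool).length = 1 then PySem.List.pyGet? (keptOf tr pool) 0
       else if (PySem.List.dedup ((keptOf tr pool).map src_of)).length > 2 then none
       else if (PySem.List.dedup ((keptOf tr pool).map src_of)).length
           = ((keptOf tr pool).map src_of).length then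
         match (keptOf tr pool).find? (fun it => src_of it == "osmwiki:P8") with
         | some it => some it
         | none => PySem.List.pyGet? (keptOf tr pool) 0
       else
         match (keptOf tr pool).find?
             (fun it => ((keptOf tr pool).map src_of).count (src_of it) == 1) with
         | some it => some it
         | none => none) := by
  simp only [specSt, mkState]
  generalize keptOf tr pool = k
  by_cases h1 : k.length = 1
  · rw [if_pos (by exact_mod_cast h1), if_pos h1, pyGet?_zero]
  · rw [if_neg (fun h => h1 (by exact_mod_cast h)), if_neg h1]
    by_cases h2 : (PySem.List.dedup (k.map src_of)).length > 2
    · rw [if_pos (by simpa using h2), if_pos h2]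
    · rw [if_neg (by simpa using h2), if_neg h2]
      have htk : (PySem.List.dedup (k.map src_of)).take 2 = PySem.List.dedup (k.map src_of) :=
        List.take_of_length_le (by omega)
      rw [htk]
      by_cases hn : (k.map src_of).Nodup
      · have hall : ((mkSlots k (PySem.List.dedup (k.map src_of))).all
            (fun s => s.2.1 == 1)) = true := by
          rw [List.all_eq_true]
          intro s hs
          obtain ⟨c, hc, rfl⟩ := List.mem_map.1 hs
          have := List.nodup_iff_count_eq_one.1 hn c ((PySem.List.mem_dedup _ _).1 hc)
          simp [this]
        rw [if_pos hall, if_pos ((dedup_length_eq_iff_nodup _).2 hn), pyGet?_zero]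
      · have hallf : ((mkSlots k (PySem.List.dedup (k.map src_of))).all
            (fun s => s.2.1 == 1)) = false := by
          rw [Bool.eq_false_iff]
          intro hforall
          apply hn
          apply List.nodup_iff_count_eq_one.2
          intro a ha
          have hmem : (a, (((k.map src_of).count a : Nat) : Int),
              (k.filter (fun it => src_of it == a)).headI)
              ∈ mkSlots k (PySem.List.dedup (k.map src_of)) :=
            List.mem_map.2 ⟨a, (PySem.List.mem_dedup _ _).2 ha, rfl⟩
          have := List.all_eq_true.1 hforall _ hmem
          simpa using this
        rw [hallf, if_neg (by simp), if_neg (fun h => hn ((dedup_length_eq_iff_nodup _).1 h))]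
        unfold mkSlots
        rw [List.find?_map]
        rw [find?_congr_mem _ (fun c _ => by
          show ((fun s => s.2.1 == 1) ∘ (fun c => (c, (((k.map src_of).count c : Nat) : Int),
              (k.filter (fun it => src_of it == c)).headI))) c
            = ((k.map src_of).count c == 1)
          simp only [Function.comp_apply]
          by_cases h : (k.map src_of).count c = 1 <;> simp [h, Nat.cast_eq_one])]
        rw [find?_dedup, List.find?_map]
        rw [show ((fun c => (k.map src_of).count c == 1) ∘ src_of)
            = (fun it => (k.map src_of).count (src_of it) == 1) from rfl]
        cases hf : k.find? (fun it => (k.map src_of).count (src_of it) == 1) with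
        | none => rfl
        | some it0 =>
          have hq := List.find?_some hf
          have hcount : (k.map src_of).count (src_of it0) = 1 := by simpa using hq
          have hlen1 : (k.filter (fun it => src_of it == src_of it0)).length = 1 := by
            rw [count_bridge _ _ _]
            exact hcount
          have hmemf : it0 ∈ k.filter (fun it => src_of it == src_of it0) :=
            List.mem_filter.2 ⟨List.mem_of_find?_eq_some hf, by simp⟩
          obtain ⟨a, ha⟩ := List.length_eq_one_iff.1 hlen1
          rw [ha] at hmemf
          rw [List.mem_singleton] at hmemf
          subst hmemf
          show some (Prod.mk (src_of it0) (Prod.mk (((k.map src_of).count (src_of it0) : Nat) : Int)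
              (k.filter (fun it => src_of it == src_of it0)).headI)).2.2 = some it0
          rw [ha]
          rfl

-- when no record is preferred, the "other" partition is the whole list
theorem filter_not_pref_eq_self (items : List (List (String × String)))
    (hp : items.filter (fun it => dget it "rank" == some "preferred") = []) :
    items.filter (fun it => !(dget it "rank" == some "preferred")) = items := by
  rw [List.filter_eq_self]
  intro it hit
  have := List.filter_eq_nil_iff.1 hp it hit
  simpa using this

-- ===== VERDICT (by name: the statement is the Claim_ definition above) =====
theorem choose_best_item_py_spec : Claim_equal_choose_best_item_py := by
  intro items _
  unfold Spec_choose_best_item_py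
  match items with
  | [] => rfl
  | [x] => rfl
  | x :: y :: rest =>
    simp only [choose_best_item_py, choose_best_item_py_alt]
    rw [if_neg (by simp : ¬ (x :: y :: rest).length = 0),
      if_neg (by simp : ¬ (x :: y :: rest).length = 1),
      if_neg (by simp : ¬ (x :: y :: rest).isEmpty = true),
      if_neg (by simp : ¬ (x :: y :: rest).length = 1)]
    rw [sorted_rank_key]
    by_cases hp : (x :: y :: rest).filter (fun it => dget it "rank" == some "preferred") = []
    · -- no preferred record: the pool is the whole list
      rw [hp, List.nil_append, filter_not_pref_eq_self _ hp]
      simp only [List.isEmpty_nil, if_true]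
      obtain ⟨e, he, _⟩ := dedup_by_url_cons x (y :: rest)
      rw [fold_spec, dispatch_eq, keptOf_def]
      rw [he]
      rw [show (x :: e).headI = x from rfl, show (x :: y :: rest).headI = x from rfl]
      rw [phase2_eq]
    · -- at least one preferred record: the pool is the preferred partition
      rw [if_neg (by simpa using hp : ¬ ((x :: y :: rest).filter
          (fun it => dget it "rank" == some "preferred")).isEmpty = true)]
      rw [if_neg (by simpa using hp : ¬ ((x :: y :: rest).filter
          (fun it => dget it "rank" == some "preferred")).isEmpty = true)]
      obtain ⟨e, he, hse⟩ := dedup_by_url_append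
        ((x :: y :: rest).filter (fun it => dget it "rank" == some "preferred"))
        ((x :: y :: rest).filter (fun it => !(dget it "rank" == some "preferred")))
      rw [he]
      obtain ⟨z, zs, hzs⟩ := List.exists_cons_of_ne_nil hp
      obtain ⟨e', he', _⟩ := dedup_by_url_cons z zs
      have hz : (dget z "rank" == some "preferred") = true := by
        have hmz : z ∈ (x :: y :: rest).filter
            (fun it => dget it "rank" == some "preferred") := by
          rw [hzs]; exact List.mem_cons_self
        exact (List.mem_filter.1 hmz).2
      have hhead : (dedup_by_url ((x :: y :: rest).filter
          (fun it => dget it "rank" == some "preferred")) ++ e).headI = z := by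
        rw [hzs, he', headI_append_left _ _ (by simp)]
        rfl
      rw [hhead, show dget z "rank" = some "preferred" by simpa using hz]
      rw [List.filter_append]
      rw [show e.filter (fun it => dget it "rank" == some "preferred") = [] by
        rw [List.filter_eq_nil_iff]
        intro it hit
        have hmem : it ∈ (x :: y :: rest).filter
            (fun it => !(dget it "rank" == some "preferred")) := hse.mem hit
        have hb := (List.mem_filter.1 hmem).2
        simpa using hb]
      rw [List.append_nil]
      rw [fold_spec, dispatch_eq, keptOf_def]
      rw [phase2_eq]
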